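-- pv_equiv track=rewrite | github.com/Alluvial-hungjury129/zen-ide | src/editor/indent_guide_levels.py | _raw_indents
-- ===== SOURCE A (Python) =====
-- def _raw_indents(text_lines, tab_width):
--     """Compute raw character-indent per line (-1 for blank lines)."""
--     result = []
--     for text in text_lines:
--         if not text.strip():
--             result.append(-1)
--         else:
--             indent = 0
--             for ch in text:
--                 if ch == " ":
--                     indent += 1
--                 elif ch == "\t":
--                     indent += tab_width
--                 else:
--                     break
--             result.append(indent)
--     return result
-- ===== SOURCE B (Python) =====
-- def _raw_indents(text_lines, tab_width):
--     """Compute raw character-indent per line (-1 for blank lines)."""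
--     def indent(text):
--         prefix = text[:len(text) - len(text.lstrip(" \t"))]
--         return prefix.count(" ") + prefix.count("\t") * tab_width
--     return [-1 if not text.strip() else indent(text) for text in text_lines]
-- ===== Notes on version B (the rewrite author's own statement) =====
-- stated objective: simpler
-- what changed: B replaces A's character-by-character accumulate-and-break loop with a two-phase decomposition: slice off the leading ' '/'\t' prefix in one step via lstrip, then compute the indent as prefix.count(' ') + prefix.count('\t')*tab_width, in a single list comprehension.
import Mathlib
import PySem

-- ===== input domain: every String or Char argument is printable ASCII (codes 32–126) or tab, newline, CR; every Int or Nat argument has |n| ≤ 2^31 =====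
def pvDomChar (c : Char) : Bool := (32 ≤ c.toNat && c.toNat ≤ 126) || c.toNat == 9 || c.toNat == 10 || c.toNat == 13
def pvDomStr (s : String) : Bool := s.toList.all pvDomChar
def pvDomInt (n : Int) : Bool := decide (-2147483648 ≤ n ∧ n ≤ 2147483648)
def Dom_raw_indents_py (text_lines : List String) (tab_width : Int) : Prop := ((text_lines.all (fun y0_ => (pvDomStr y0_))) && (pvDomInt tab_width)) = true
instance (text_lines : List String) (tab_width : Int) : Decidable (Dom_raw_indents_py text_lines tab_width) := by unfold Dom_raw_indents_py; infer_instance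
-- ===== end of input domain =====

-- B replaces A's character-by-character accumulate/break loop by a two-phase decomposition:
-- slice off the leading ' '/'\t' prefix in one step, then count spaces and tabs in it (objective: simpler).

-- ===== PORT A =====
-- inner 'for ch in text: … else: break' loop, accumulating indent
def pvAIndent (tab_width : Int) : List Char → Int → Int
  | [], indent => indent
  | c :: cs, indent =>
    if c == ' ' then pvAIndent tab_width cs (indent + 1)
    else if c == '\t' then pvAIndent tab_width cs (indent + tab_width)
    else indent

def raw_indents_py (text_lines : List String) (tab_width : Int) : List Int :=
  text_lines.foldl (fun result text =>
    if PySem.Str.strip text == "" then result ++ [-1]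
    else result ++ [pvAIndent tab_width text.toList 0]) []

-- ===== PORT B =====
-- one line: prefix = text[:len(text) - len(text.lstrip(" \t"))]; lstrip(" \t") ported by hand as
-- dropWhile (c = ' ' or c = '\t'), which is exact; prefix.count(" ") on a one-char needle = List.count (exact)
def pvBIndent (text : List Char) (tab_width : Int) : Int :=
  let pfx := PySem.List.slice text none
    (some ((text.length : Int) - ((text.dropWhile (fun c => c == ' ' || c == '\t')).length : Int)))
  (pfx.count ' ' : Int) + (pfx.count '\t' : Int) * tab_width

def raw_indents_py_alt (text_lines : List String) (tab_width : Int) : List Int :=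
  text_lines.map (fun text =>
    if PySem.Str.strip text == "" then -1 else pvBIndent text.toList tab_width)

-- ===== PRECONDITION & SPEC =====
def Spec_raw_indents_py (text_lines : List String) (tab_width : Int) (out : List Int) : Prop := out = raw_indents_py_alt text_lines tab_width
instance (text_lines : List String) (tab_width : Int) (out : List Int) : Decidable (Spec_raw_indents_py text_lines tab_width out) := by unfold Spec_raw_indents_py; infer_instance

-- ===== CLAIM (what is proved, stated in full; the proofs are below) =====
def Claim_equal_raw_indents_py : Prop := ∀ (text_lines : List String) (tab_width : Int), Dom_raw_indents_py text_lines tab_width → Spec_raw_indents_py text_lines tab_width (raw_indents_py text_lines tab_width)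

-- ===== LEMMAS AND PROOFS =====
-- A's break loop computes the counts over the takeWhile-prefix
theorem pvAIndent_eq (tab_width : Int) (cs : List Char) : ∀ (ind : Int),
    pvAIndent tab_width cs ind =
      ind + ((cs.takeWhile (fun c => c == ' ' || c == '\t')).count ' ' : Int)
          + ((cs.takeWhile (fun c => c == ' ' || c == '\t')).count '\t' : Int) * tab_width := by
  induction cs with
  | nil => intro ind; simp [pvAIndent]
  | cons c cs ih =>
    intro ind
    by_cases hsp : c = ' '
    · subst hsp
      simp [pvAIndent, ih]
      ring
    · by_cases htb : c = '\t'
      · subst htb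
        simp [pvAIndent, ih]
        ring
      · simp [pvAIndent, hsp, htb]

-- B's slice isolates exactly that takeWhile-prefix
theorem pvSlice_prefix (cs : List Char) (p : Char → Bool) :
    PySem.List.slice cs none (some ((cs.length : Int) - ((cs.dropWhile p).length : Int)))
      = cs.takeWhile p := by
  have hlen : (cs.takeWhile p).length + (cs.dropWhile p).length = cs.length := by
    have h := congrArg List.length (List.takeWhile_append_dropWhile (p := p) (l := cs))
    rw [List.length_append] at h
    exact h
  have hk : ((cs.length : Int) - ((cs.dropWhile p).length : Int)) = ((cs.takeWhile p).length : Int) := by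
    omega
  rw [hk, PySem.List.slice_to_natCast]
  exact (List.prefix_iff_eq_take.mp (List.takeWhile_prefix p)).symm

theorem pvIndent_eq (tab_width : Int) (cs : List Char) :
    pvAIndent tab_width cs 0 = pvBIndent cs tab_width := by
  rw [pvAIndent_eq, pvBIndent, pvSlice_prefix]
  ring

-- ===== VERDICT (by name: the statement is the Claim_ definition above) =====
theorem raw_indents_py_spec : Claim_equal_raw_indents_py := by
  intro text_lines tab_width _
  unfold Spec_raw_indents_py raw_indents_py raw_indents_py_alt
  have hfun : (fun (result : List Int) (text : String) =>
        if PySem.Str.strip text == "" then result ++ [-1]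
        else result ++ [pvAIndent tab_width text.toList 0])
      = fun (result : List Int) (text : String) =>
        result ++ [if PySem.Str.strip text == "" then (-1 : Int)
                   else pvBIndent text.toList tab_width] := by
    funext result text
    by_cases h : PySem.Str.strip text == "" <;> simp [h, pvIndent_eq]
  rw [hfun, PySem.List.foldl_append_singleton_eq_map]
  simp
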